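-- pv_equiv track=rewrite | github.com/S-bite/ac-committer | submissions/abc068/arc079_b/WA_6154771.py | f
-- ===== SOURCE A (Python) =====
-- def f(l):
--     mx=max(l)
--     flg=True
--     for i in range(len(l)):
--         if (mx==l[i] and flg==True):
--             flg=False
--             l[i]-=50
--         else:
--             l[i]+=1
--     return l
-- ===== SOURCE B (Python) =====
-- def f(l):
--     i = l.index(max(l))
--     for j in range(len(l)):
--         l[j] += 1
--     l[i] -= 51
--     return l
-- ===== Notes on version B (the rewrite author's own statement) =====
-- stated objective: simpler
-- what changed: Instead of a flag-carrying loop that branches per element, B locates the first maximum with l.index(max(l)) up front, increments every element uniformly, and applies one correction l[i] -= 51.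
-- outside the precondition, e.g. on f([]): A raises ValueError, B raises ValueError
import Mathlib
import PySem

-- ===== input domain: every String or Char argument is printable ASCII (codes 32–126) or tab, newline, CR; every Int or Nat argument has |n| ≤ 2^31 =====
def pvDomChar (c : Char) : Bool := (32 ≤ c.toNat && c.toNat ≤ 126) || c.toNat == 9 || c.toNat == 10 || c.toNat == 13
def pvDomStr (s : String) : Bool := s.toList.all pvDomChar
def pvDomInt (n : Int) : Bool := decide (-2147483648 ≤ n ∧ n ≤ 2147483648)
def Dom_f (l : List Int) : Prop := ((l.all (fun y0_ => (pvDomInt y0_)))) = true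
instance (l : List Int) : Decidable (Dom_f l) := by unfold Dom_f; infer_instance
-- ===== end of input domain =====

-- B replaces A's flag-carrying branch-per-element loop by: find the first maximum's index,
-- increment everything uniformly, then one correction at that index (return value only;
-- both Pythons mutate the argument in place the same way).

-- ===== PORT A =====
-- the for-loop over range(len(l)) rewriting l[i], with the flg state, as structural recursion
def fGoA (mx : Int) (flg : Bool) : List Int → List Int
  | [] => []
  | x :: xs =>
      if mx == x && flg then (x - 50) :: fGoA mx false xs
      else (x + 1) :: fGoA mx flg xs

def f (l : List Int) : List Int :=
  match PySem.List.max? l (fun y => y) with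
  | none => []        -- Python raises ValueError on max([]) ; excluded by Pre_f
  | some mx => fGoA mx true l

-- ===== PORT B =====
def f_alt (l : List Int) : List Int :=
  match PySem.List.max? l (fun y => y) with
  | none => []        -- Python raises ValueError on max([]) ; excluded by Pre_f
  | some mx =>
    match PySem.List.index? l mx with
    | none => []      -- unreachable: the maximum is a member of the list
    | some i =>
      let l2 := l.map (· + 1)
      l2.set i (l2.getD i 0 - 51)

-- ===== PRECONDITION & SPEC =====
-- Pre_f excludes the empty list, on which Python's max([]) raises ValueError (in A and in B).
def Pre_f (l : List Int) : Prop := l ≠ []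
instance (l : List Int) : Decidable (Pre_f l) := by unfold Pre_f; infer_instance
def pvWitness_f : List Int := [3, 1, 3]

def Spec_f (l : List Int) (out : List Int) : Prop := out = f_alt l
instance (l : List Int) (out : List Int) : Decidable (Spec_f l out) := by unfold Spec_f; infer_instance

-- ===== CLAIM (what is proved, stated in full; the proofs are below) =====
def Claim_equal_f : Prop := ∀ (l : List Int), Dom_f l → Pre_f l → Spec_f l (f l)

-- ===== LEMMAS AND PROOFS =====
-- once the flag is spent, A's loop just adds 1 everywhere
theorem fGoA_false (mx : Int) (l : List Int) : fGoA mx false l = l.map (· + 1) := by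
  induction l with
  | nil => rfl
  | cons x xs ih => simp [fGoA, ih]

-- with the flag live, A's loop is the uniform +1 pass with B's single correction at
-- the first index of mx
theorem fGoA_true (mx : Int) (l : List Int) (i : Nat)
    (h : PySem.List.index? l mx = some i) :
    fGoA mx true l = (l.map (· + 1)).set i ((l.map (· + 1)).getD i 0 - 51) := by
  induction l generalizing i with
  | nil => simp [PySem.List.index?_eq_idxOf?, List.idxOf?] at h
  | cons x xs ih =>
    by_cases hx : mx = x
    · subst hx
      rw [PySem.List.index?_cons_self] at h
      cases h
      simp [fGoA, fGoA_false]
      ring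
    · rw [PySem.List.index?_cons_of_ne xs (show x ≠ mx from fun h => hx h.symm)] at h
      cases hj : PySem.List.index? xs mx with
      | none => rw [hj] at h; simp at h
      | some j =>
        rw [hj] at h
        simp at h
        subst h
        simp [fGoA, hx, ih j hj]

-- ===== VERDICT (by name: the statement is the Claim_ definition above) =====
theorem f_spec : Claim_equal_f := by
  intro l _ hpre
  unfold Spec_f f f_alt
  cases hmx : PySem.List.max? l (fun y => y) with
  | none => exact absurd (((PySem.List.max?_eq_none_iff l (fun y => y)).mp hmx)) hpre
  | some mx =>
    have hmem : mx ∈ l := PySem.List.max?_mem hmx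
    cases hi : PySem.List.index? l mx with
    | none =>
      have : mx ∉ l := ((PySem.List.index?_eq_none_iff l mx).mp hi)
      exact absurd hmem this
    | some i => simp only [hi]; exact fGoA_true mx l i hi
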